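-- pv_equiv track=rewrite | github.com/DuarteDomingues/Artificial-Intelligence-and-Cognitive-Systems | 03_state_space_search_and_otimization/lib/otimizacao/res_problemas/problema_n_rainhas.py | obter_estados_vizinhos
-- ===== SOURCE A (Python) =====
-- def obter_estados_vizinhos(estado):
--
--     vizinhos = []
--     for i in range(len(estado)):
--         for x in range(len(estado)):
--             for y in range(len(estado)):
--                 if (x != estado[i][0] or y != estado[i][1]) and (x,y) not in estado:
--                     novo_estado = estado.copy()
--                     novo_estado[i] = (x,y)
--                     vizinhos.append(novo_estado)
--     return vizinhos
-- ===== SOURCE B (Python) =====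
-- def obter_estados_vizinhos(estado):
--     n = len(estado)
--     occupied = set(estado)
--     free = [(x, y) for x in range(n) for y in range(n) if (x, y) not in occupied]
--
--     def go(prefix, suffix):
--         if not suffix:
--             return []
--         rest = suffix[1:]
--         return [prefix + [c] + rest for c in free] + go(prefix + [suffix[0]], rest)
--
--     return go([], estado)
-- ===== Notes on version B (the rewrite author's own statement) =====
-- stated objective: alternative
-- what changed: B precomputes the free cells once and then builds each neighbor by structural recursion over the state list, splicing prefix + [cell] + suffix instead of index-based triple loops that copy and re-scan the state for every cell; the original's first condition is redundant since (x,y)==estado[i] is already excluded by the membership test.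
import Mathlib
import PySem

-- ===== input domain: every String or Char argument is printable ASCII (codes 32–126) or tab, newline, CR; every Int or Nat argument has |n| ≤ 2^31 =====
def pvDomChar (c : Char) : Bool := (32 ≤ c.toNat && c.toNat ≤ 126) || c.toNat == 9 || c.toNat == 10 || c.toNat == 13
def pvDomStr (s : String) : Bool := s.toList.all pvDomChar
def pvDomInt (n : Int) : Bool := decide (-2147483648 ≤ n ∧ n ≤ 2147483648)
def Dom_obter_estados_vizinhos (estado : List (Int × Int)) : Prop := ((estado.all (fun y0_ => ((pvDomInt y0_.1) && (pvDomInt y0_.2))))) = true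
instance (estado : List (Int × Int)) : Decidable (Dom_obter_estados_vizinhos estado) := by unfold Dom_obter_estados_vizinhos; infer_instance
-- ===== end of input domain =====

-- B precomputes the free cells once and builds each neighbor by structural recursion over the
-- state list, splicing prefix ++ [cell] ++ suffix, instead of A's index-based triple loops.

-- ===== PORT A =====
def obter_estados_vizinhos (estado : List (Int × Int)) : List (List (Int × Int)) :=
  (PySem.List.pyRange 0 estado.length).foldl (fun vizinhos i =>
    (PySem.List.pyRange 0 estado.length).foldl (fun vizinhos x =>
      (PySem.List.pyRange 0 estado.length).foldl (fun vizinhos y =>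
        -- estado[i]: i ranges over range(len(estado)), so the index is always in range
        let ei := PySem.List.pyGetD estado i (0, 0)
        if ((!(x == ei.1) || !(y == ei.2)) && !(estado.contains (x, y))) then
          vizinhos ++ [PySem.List.pySetD estado i (x, y)]
        else vizinhos) vizinhos) vizinhos) []

-- ===== PORT B =====
-- B's inner recursion go(prefix, suffix)
def pvGo (free : List (Int × Int)) (pre suf : List (Int × Int)) : List (List (Int × Int)) :=
  match suf with
  | [] => []
  | h :: rest => free.map (fun c => pre ++ [c] ++ rest) ++ pvGo free (pre ++ [h]) rest

def obter_estados_vizinhos_alt (estado : List (Int × Int)) : List (List (Int × Int)) :=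
  let n : Int := estado.length
  let occupied := PySem.Set.ofList estado
  let free := (PySem.List.pyRange 0 n).flatMap (fun x =>
    ((PySem.List.pyRange 0 n).filter (fun y => !(occupied.contains (x, y)))).map (fun y => (x, y)))
  pvGo free [] estado

-- ===== PRECONDITION & SPEC =====
def Spec_obter_estados_vizinhos (estado : List (Int × Int)) (out : List (List (Int × Int))) : Prop := out = obter_estados_vizinhos_alt estado
instance (estado : List (Int × Int)) (out : List (List (Int × Int))) : Decidable (Spec_obter_estados_vizinhos estado out) := by unfold Spec_obter_estados_vizinhos; infer_instance

-- ===== CLAIM (what is proved, stated in full; the proofs are below) =====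
def Claim_equal_obter_estados_vizinhos : Prop := ∀ (estado : List (Int × Int)), Dom_obter_estados_vizinhos estado → Spec_obter_estados_vizinhos estado (obter_estados_vizinhos estado)

-- ===== LEMMAS AND PROOFS =====

-- the free-cell list B precomputes
def pvFree (estado : List (Int × Int)) : List (Int × Int) :=
  (PySem.List.pyRange 0 estado.length).flatMap (fun x =>
    ((PySem.List.pyRange 0 estado.length).filter
      (fun y => !((PySem.Set.ofList estado).contains (x, y)))).map (fun y => (x, y)))

-- A's condition collapses to plain non-membership when estado[i] is an element of estado
theorem cond_eq_not_mem (estado : List (Int × Int)) {i : Int}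
    (hi : i ∈ PySem.List.pyRange 0 estado.length) (x y : Int) :
    ((!(x == (PySem.List.pyGetD estado i (0, 0)).1) ||
      !(y == (PySem.List.pyGetD estado i (0, 0)).2)) && !(estado.contains (x, y)))
      = !(estado.contains (x, y)) := by
  obtain ⟨h0, h1⟩ := PySem.List.mem_pyRange_one.mp hi
  rw [PySem.List.pyGetD_eq_getElem estado (0, 0) h0 h1]
  have hmem : estado[i.toNat] ∈ estado := List.getElem_mem _
  by_cases hc : (x, y) ∈ estado
  · simp [hc]
  · have hne : (x, y) ≠ estado[i.toNat] := fun h => hc (h ▸ hmem)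
    have : x ≠ (estado[i.toNat]).1 ∨ y ≠ (estado[i.toNat]).2 := by
      by_contra h
      push Not at h
      exact hne (Prod.ext h.1 h.2)
    rcases this with h | h <;> simp [hc, h]

-- A's inner double loop for a fixed i appends exactly the free cells, substituted at i
theorem inner_block_eq (estado : List (Int × Int)) {i : Int}
    (hi : i ∈ PySem.List.pyRange 0 estado.length) (acc : List (List (Int × Int))) :
    (PySem.List.pyRange 0 estado.length).foldl (fun vizinhos x =>
      (PySem.List.pyRange 0 estado.length).foldl (fun vizinhos y =>
        let ei := PySem.List.pyGetD estado i (0, 0)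
        if ((!(x == ei.1) || !(y == ei.2)) && !(estado.contains (x, y))) then
          vizinhos ++ [PySem.List.pySetD estado i (x, y)]
        else vizinhos) vizinhos) acc
    = acc ++ (pvFree estado).map (fun c => PySem.List.pySetD estado i c) := by
  have hy : ∀ (x : Int) (acc : List (List (Int × Int))),
      (PySem.List.pyRange 0 estado.length).foldl (fun vizinhos y =>
        let ei := PySem.List.pyGetD estado i (0, 0)
        if ((!(x == ei.1) || !(y == ei.2)) && !(estado.contains (x, y))) then
          vizinhos ++ [PySem.List.pySetD estado i (x, y)]
        else vizinhos) acc
      = acc ++ (((PySem.List.pyRange 0 estado.length).filter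
          (fun y => !((PySem.Set.ofList estado).contains (x, y)))).map
            (fun y => (x, y))).map (fun c => PySem.List.pySetD estado i c) := by
    intro x acc
    have hcond : ∀ y : Int,
        ((!(x == (PySem.List.pyGetD estado i (0, 0)).1) ||
          !(y == (PySem.List.pyGetD estado i (0, 0)).2)) && !(estado.contains (x, y)))
        = !((PySem.Set.ofList estado).contains (x, y)) := by
      intro y
      rw [cond_eq_not_mem estado hi x y]
      congr 1
      simp [List.contains_eq_mem, PySem.Set.mem_ofList]
    calc (PySem.List.pyRange 0 estado.length).foldl (fun vizinhos y =>
            let ei := PySem.List.pyGetD estado i (0, 0)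
            if ((!(x == ei.1) || !(y == ei.2)) && !(estado.contains (x, y))) then
              vizinhos ++ [PySem.List.pySetD estado i (x, y)]
            else vizinhos) acc
        = (PySem.List.pyRange 0 estado.length).foldl (fun vizinhos y =>
            if (!((PySem.Set.ofList estado).contains (x, y))) then
              vizinhos ++ [PySem.List.pySetD estado i (x, y)]
            else vizinhos) acc := by
          refine PySem.List.foldl_congr_mem _ _ _ _ ?_
          intro acc' y _
          simp only [hcond y]
      _ = acc ++ (((PySem.List.pyRange 0 estado.length).filter
            (fun y => !((PySem.Set.ofList estado).contains (x, y)))).map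
              (fun y => PySem.List.pySetD estado i (x, y))) := by
          exact PySem.List.foldl_append_if _ _ _ _
      _ = _ := by rw [List.map_map]; rfl
  calc (PySem.List.pyRange 0 estado.length).foldl _ acc
      = (PySem.List.pyRange 0 estado.length).foldl (fun vizinhos x =>
          vizinhos ++ (((PySem.List.pyRange 0 estado.length).filter
            (fun y => !((PySem.Set.ofList estado).contains (x, y)))).map
              (fun y => (x, y))).map (fun c => PySem.List.pySetD estado i c)) acc := by
        refine PySem.List.foldl_congr_mem _ _ _ _ ?_
        intro acc' x _
        exact hy x acc'
    _ = acc ++ (PySem.List.pyRange 0 estado.length).flatMap (fun x =>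
          (((PySem.List.pyRange 0 estado.length).filter
            (fun y => !((PySem.Set.ofList estado).contains (x, y)))).map
              (fun y => (x, y))).map (fun c => PySem.List.pySetD estado i c)) :=
        PySem.List.foldl_append_eq_flatMap _ _ _
    _ = acc ++ (pvFree estado).map (fun c => PySem.List.pySetD estado i c) := by
        rw [pvFree, List.map_flatMap]

-- A equals the flatMap over indices of free-cell substitutions
theorem a_eq_flatMap (estado : List (Int × Int)) :
    obter_estados_vizinhos estado
      = (PySem.List.pyRange 0 estado.length).flatMap
          (fun i => (pvFree estado).map (fun c => PySem.List.pySetD estado i c)) := by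
  unfold obter_estados_vizinhos
  calc (PySem.List.pyRange 0 estado.length).foldl _ []
      = (PySem.List.pyRange 0 estado.length).foldl (fun vizinhos i =>
          vizinhos ++ (pvFree estado).map (fun c => PySem.List.pySetD estado i c)) [] := by
        refine PySem.List.foldl_congr_mem _ _ _ _ ?_
        intro acc i hi
        exact inner_block_eq estado hi acc
    _ = [] ++ _ := PySem.List.foldl_append_eq_flatMap _ _ _
    _ = _ := by rw [List.nil_append]

-- B's recursion, at prefix pre and suffix suf, emits exactly the single-index substitutions of suf
theorem pvGo_eq (free : List (Int × Int)) (pre suf : List (Int × Int)) :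
    pvGo free pre suf
      = (List.range suf.length).flatMap
          (fun k => free.map (fun c => pre ++ suf.set k c)) := by
  induction suf generalizing pre with
  | nil => simp [pvGo]
  | cons h rest ih =>
    rw [pvGo, ih (pre ++ [h]), List.length_cons, List.range_succ_eq_map]
    simp [List.flatMap_cons, List.flatMap_map]

theorem ports_agree (estado : List (Int × Int)) :
    obter_estados_vizinhos estado = obter_estados_vizinhos_alt estado := by
  rw [a_eq_flatMap]
  show _ = pvGo (pvFree estado) [] estado
  rw [pvGo_eq]
  rw [show (estado.length : Int) = ((estado.length : Nat) : Int) from rfl,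
    PySem.List.pyRange_zero_natCast, List.flatMap_map]
  refine List.flatMap_congr ?_
  intro k _
  refine List.map_congr_left ?_
  intro c _
  simp [PySem.List.pySetD_natCast]

-- ===== VERDICT (by name: the statement is the Claim_ definition above) =====
theorem obter_estados_vizinhos_spec : Claim_equal_obter_estados_vizinhos := by
  intro estado _
  unfold Spec_obter_estados_vizinhos
  exact ports_agree estado
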